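-- pv_equiv track=rewrite | github.com/andykr1k/NTILC | orchestrator/protocol/tokens.py | spans_between_token_ids
-- ===== SOURCE A (Python) =====
-- from typing import Any, Dict, Iterable, List, Mapping, Sequence, Tuple
--
-- def spans_between_token_ids(token_ids: Sequence[int], start_id: int, end_id: int) -> List[List[int]]:
--     if start_id < 0 or end_id < 0:
--         return []
--
--     ids = [int(i) for i in token_ids]
--     spans: List[List[int]] = []
--     idx = 0
--     n = len(ids)
--
--     while idx < n:
--         while idx < n and ids[idx] != start_id:
--             idx += 1
--         if idx >= n:
--             break
--         payload_start = idx + 1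
--         idx = payload_start
--         while idx < n and ids[idx] != end_id:
--             idx += 1
--         if idx >= n:
--             break
--         spans.append(ids[payload_start:idx])
--         idx += 1
--
--     return spans
-- ===== SOURCE B (Python) =====
-- def spans_between_token_ids(token_ids, start_id, end_id):
--     if start_id < 0 or end_id < 0:
--         return []
--     ids = [int(i) for i in token_ids]
--     spans = []
--     in_span = False
--     buf = []
--     for t in ids:
--         if in_span:
--             if t == end_id:
--                 spans.append(buf)
--                 in_span = False
--             else:
--                 buf.append(t)
--         elif t == start_id:
--             in_span = True
--             buf = []
--     return spans
-- ===== Notes on version B (the rewrite author's own statement) =====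
-- stated objective: simpler
-- what changed: Replaced A's index-jumping nested while-loops (outer scan plus two inner search loops and a slice) by a single for-loop over the tokens maintaining an in_span flag, a current buffer and the result list.
import Mathlib
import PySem

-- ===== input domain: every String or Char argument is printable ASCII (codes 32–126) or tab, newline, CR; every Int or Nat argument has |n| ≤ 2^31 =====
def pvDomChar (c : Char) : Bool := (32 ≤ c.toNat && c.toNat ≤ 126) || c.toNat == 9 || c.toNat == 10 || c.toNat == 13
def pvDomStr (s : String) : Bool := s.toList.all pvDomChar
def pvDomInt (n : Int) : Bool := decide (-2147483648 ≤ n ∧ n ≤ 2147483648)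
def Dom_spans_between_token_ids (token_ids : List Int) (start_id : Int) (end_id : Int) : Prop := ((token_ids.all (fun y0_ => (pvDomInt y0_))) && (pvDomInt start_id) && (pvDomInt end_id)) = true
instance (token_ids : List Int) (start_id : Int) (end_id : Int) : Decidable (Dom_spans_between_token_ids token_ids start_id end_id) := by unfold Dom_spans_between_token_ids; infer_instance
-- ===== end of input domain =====

-- B replaces A's index-jumping double-while scanner by a single fold with an in_span flag
-- and a running buffer (objective: simpler); same return value on every input.

-- ===== PORT A =====
-- inner while: `while idx < n and ids[idx] != t: idx += 1`
def pvFindFrom (ids : List Int) (t : Int) (idx : Nat) : Nat :=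
  if idx < ids.length ∧ ids.getD idx 0 ≠ t then pvFindFrom ids t (idx + 1) else idx
termination_by ids.length - idx
decreasing_by omega

theorem pvFindFrom_ge (ids : List Int) (t : Int) (idx : Nat) : idx ≤ pvFindFrom ids t idx := by
  fun_induction pvFindFrom <;> omega

-- outer while loop of A, with idx and the spans accumulator
def pvOuterA (ids : List Int) (s e : Int) (idx : Nat) (spans : List (List Int)) : List (List Int) :=
  if idx < ids.length then
    let i1 := pvFindFrom ids s idx
    if i1 ≥ ids.length then spans
    else
      let i2 := pvFindFrom ids e (i1 + 1)
      if i2 ≥ ids.length then spans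
      else pvOuterA ids s e (i2 + 1)
        (spans ++ [PySem.List.slice ids (some ((i1 + 1 : Nat) : Int)) (some ((i2 : Nat) : Int))])
  else spans
termination_by ids.length - idx
decreasing_by
  have h1 := pvFindFrom_ge ids s idx
  have h2 := pvFindFrom_ge ids e (pvFindFrom ids s idx + 1)
  omega

def spans_between_token_ids (token_ids : List Int) (start_id : Int) (end_id : Int) : List (List Int) :=
  if start_id < 0 ∨ end_id < 0 then []
  else pvOuterA token_ids start_id end_id 0 []

-- ===== PORT B =====
-- one step of B's for-loop: state = (in_span, buf, spans)
def pvStepB (s e : Int) (st : Bool × List Int × List (List Int)) (t : Int) :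
    Bool × List Int × List (List Int) :=
  match st with
  | (inSpan, buf, spans) =>
    if inSpan then
      if t = e then (false, buf, spans ++ [buf])
      else (true, buf ++ [t], spans)
    else if t = s then (true, [], spans)
    else (false, buf, spans)

def spans_between_token_ids_alt (token_ids : List Int) (start_id : Int) (end_id : Int) : List (List Int) :=
  if start_id < 0 ∨ end_id < 0 then []
  else (token_ids.foldl (pvStepB start_id end_id) (false, [], [])).2.2

-- ===== PRECONDITION & SPEC =====
def Spec_spans_between_token_ids (token_ids : List Int) (start_id : Int) (end_id : Int) (out : List (List Int)) : Prop := out = spans_between_token_ids_alt token_ids start_id end_id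
instance (token_ids : List Int) (start_id : Int) (end_id : Int) (out : List (List Int)) : Decidable (Spec_spans_between_token_ids token_ids start_id end_id out) := by unfold Spec_spans_between_token_ids; infer_instance

-- ===== CLAIM (what is proved, stated in full; the proofs are below) =====
def Claim_equal_spans_between_token_ids : Prop := ∀ (token_ids : List Int) (start_id : Int) (end_id : Int), Dom_spans_between_token_ids token_ids start_id end_id → Spec_spans_between_token_ids token_ids start_id end_id (spans_between_token_ids token_ids start_id end_id)

-- ===== LEMMAS AND PROOFS =====

theorem pvFindFrom_stop (ids : List Int) (t : Int) (idx : Nat) (h : ¬ idx < ids.length) :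
    pvFindFrom ids t idx = idx := by
  rw [pvFindFrom, if_neg (by tauto)]

theorem pvFindFrom_hit (ids : List Int) (t : Int) (idx : Nat) (h : idx < ids.length)
    (hx : ids[idx] = t) : pvFindFrom ids t idx = idx := by
  rw [pvFindFrom, if_neg]
  rw [List.getD_eq_getElem ids 0 h]
  tauto

theorem pvFindFrom_miss (ids : List Int) (t : Int) (idx : Nat) (h : idx < ids.length)
    (hx : ids[idx] ≠ t) : pvFindFrom ids t idx = pvFindFrom ids t (idx + 1) := by
  rw [pvFindFrom]
  rw [if_pos ⟨h, by rw [List.getD_eq_getElem ids 0 h]; exact hx⟩]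

-- reference function: the spans of a token list, structurally (b? = the open buffer, if any)
def pvGH (s e : Int) : List Int → Option (List Int) → List (List Int)
  | [], _ => []
  | x :: xs, none => if x = s then pvGH s e xs (some []) else pvGH s e xs none
  | x :: xs, some buf => if x = e then buf :: pvGH s e xs none else pvGH s e xs (some (buf ++ [x]))

-- B's fold computes pvGH
theorem pvFoldB_eq (s e : Int) (xs : List Int) :
    ∀ (b : Bool) (buf : List Int) (spans : List (List Int)),
    (xs.foldl (pvStepB s e) (b, buf, spans)).2.2
      = spans ++ pvGH s e xs (if b then some buf else none) := by
  induction xs with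
  | nil => intro b buf spans; cases b <;> simp [pvGH]
  | cons x xs ih =>
    intro b buf spans
    cases b <;> simp only [List.foldl_cons, pvStepB]
    · by_cases hx : x = s <;> simp [hx, ih, pvGH]
    · by_cases hx : x = e <;> simp [hx, ih, pvGH]

theorem drop_ge (ids : List Int) (idx : Nat) (h : ¬ idx < ids.length) : ids.drop idx = [] := by
  simp [List.drop_eq_nil_iff]; omega

-- the end-scan: pvGH with an open buffer, via pvFindFrom
theorem pvGH_open (ids : List Int) (s e : Int) :
    ∀ (k ps : Nat) (buf : List Int), ids.length - ps ≤ k →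
    pvGH s e (ids.drop ps) (some buf)
      = if pvFindFrom ids e ps < ids.length
        then (buf ++ (ids.drop ps).take (pvFindFrom ids e ps - ps))
              :: pvGH s e (ids.drop (pvFindFrom ids e ps + 1)) none
        else [] := by
  intro k
  induction k with
  | zero =>
    intro ps buf hk
    have hn : ¬ ps < ids.length := by omega
    rw [drop_ge ids ps hn, pvFindFrom_stop ids e ps hn]
    simp [pvGH, hn]
  | succ k ih =>
    intro ps buf hk
    by_cases hn : ps < ids.length
    · rw [List.drop_eq_getElem_cons hn]
      by_cases hx : ids[ps] = e
      · rw [pvFindFrom_hit ids e ps hn hx]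
        simp [pvGH, hx, hn]
      · rw [pvFindFrom_miss ids e ps hn hx]
        have hge := pvFindFrom_ge ids e (ps + 1)
        simp only [pvGH, if_neg hx]
        rw [ih (ps + 1) (buf ++ [ids[ps]]) (by omega)]
        by_cases h2 : pvFindFrom ids e (ps + 1) < ids.length
        · have h3 : pvFindFrom ids e (ps + 1) - ps
              = (pvFindFrom ids e (ps + 1) - (ps + 1)) + 1 := by omega
          rw [if_pos h2, if_pos h2, h3, List.take_succ_cons]
          simp
        · rw [if_neg h2, if_neg h2]
    · rw [drop_ge ids ps hn, pvFindFrom_stop ids e ps hn]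
      simp [pvGH, hn]

-- A's outer loop computes pvGH
theorem pvOuterA_eq (ids : List Int) (s e : Int) :
    ∀ (k idx : Nat) (spans : List (List Int)), ids.length - idx ≤ k →
    pvOuterA ids s e idx spans = spans ++ pvGH s e (ids.drop idx) none := by
  intro k
  induction k with
  | zero =>
    intro idx spans hk
    have hn : ¬ idx < ids.length := by omega
    rw [pvOuterA, if_neg hn, drop_ge ids idx hn]
    simp [pvGH]
  | succ k ih =>
    intro idx spans hk
    by_cases hn : idx < ids.length
    · by_cases hx : ids[idx] = s
      · -- a span opens at idx
        have hf : pvFindFrom ids s idx = idx := pvFindFrom_hit ids s idx hn hx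
        have hge := pvFindFrom_ge ids e (idx + 1)
        rw [pvOuterA]
        simp only [if_pos hn, hf]
        rw [List.drop_eq_getElem_cons hn]
        simp only [pvGH, if_pos hx]
        rw [pvGH_open ids s e (k + 1) (idx + 1) [] (by omega)]
        by_cases h2 : pvFindFrom ids e (idx + 1) < ids.length
        · rw [if_pos h2, if_neg (by omega : ¬ idx ≥ ids.length),
              if_neg (by omega : ¬ pvFindFrom ids e (idx + 1) ≥ ids.length)]
          rw [ih (pvFindFrom ids e (idx + 1) + 1) _ (by omega)]
          rw [PySem.List.slice_natCast]
          simp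
        · rw [if_neg h2, if_neg (by omega : ¬ idx ≥ ids.length),
              if_pos (by omega : pvFindFrom ids e (idx + 1) ≥ ids.length)]
          simp
      · -- idx is skipped by the start-scan
        have hf : pvFindFrom ids s idx = pvFindFrom ids s (idx + 1) :=
          pvFindFrom_miss ids s idx hn hx
        have heq : pvOuterA ids s e idx spans = pvOuterA ids s e (idx + 1) spans := by
          rw [pvOuterA, pvOuterA, if_pos hn, hf]
          by_cases h1 : idx + 1 < ids.length
          · rw [if_pos h1]
          · have h0 : pvFindFrom ids s (idx + 1) = idx + 1 :=
              pvFindFrom_stop ids s (idx + 1) h1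
            rw [if_neg h1, h0, if_pos (by omega : idx + 1 ≥ ids.length)]
        rw [heq, ih (idx + 1) spans (by omega)]
        rw [List.drop_eq_getElem_cons hn]
        simp [pvGH, hx]
    · rw [pvOuterA, if_neg hn, drop_ge ids idx hn]
      simp [pvGH]

-- ===== VERDICT (by name: the statement is the Claim_ definition above) =====
theorem spans_between_token_ids_spec : Claim_equal_spans_between_token_ids := by
  intro ids s e _
  unfold Spec_spans_between_token_ids spans_between_token_ids spans_between_token_ids_alt
  by_cases h : s < 0 ∨ e < 0
  · simp [h]
  · simp only [if_neg h]
    rw [pvOuterA_eq ids s e ids.length 0 [] (by omega), pvFoldB_eq]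
    simp
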